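-- pv_equiv track=rewrite | github.com/Franck-Dernoncourt/dragoncode | PuTTY.py | _camelify
-- ===== SOURCE A (Python) =====
-- def capitalizeFirst(w):
--     return w[0].upper()+w[1:]
--
-- def removeAnnotations(word):
--     i = 0
--     w = ""
--     while i < len(word):
--         if word[i] == '\\': return w
--         w = w+word[i]
--         i+= 1
--     return w
--
-- def _camelify(words):
--     newText = ''
--     for word in words:
--         word = removeAnnotations(word)
--         if len(word)  < 1: pass
--         elif newText == '':
--             newText = word[:1].lower() + word[1:]
--         else:
--             newText = '%s%s' % (newText, capitalizeFirst(word))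
--     return newText
-- ===== SOURCE B (Python) =====
-- def _camelify(words):
--     # Capitalize the first letter of EVERY cleaned non-empty word and join them,
--     # then lowercase the first character of the whole result: no word is special
--     # during the pass, so no first-word flag or head/tail split is needed.
--     s = ''.join(c[:1].upper() + c[1:]
--                 for c in (w.split('\\', 1)[0] for w in words) if c)
--     return s[:1].lower() + s[1:]
-- ===== Notes on version B (the rewrite author's own statement) =====
-- stated objective: faster
-- what changed: B treats no word specially: it capitalizes the first letter of every cleaned non-empty word (prefix before the first backslash), joins them all with ''.join, and only then lowercases the first character of the finished string, replacing A's stateful newText==''-flag loop with repeated quadratic concatenation and the char-by-char removeAnnotations scan; correctness rests on lower(upper(c)) == lower(c) for ASCII.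
import Mathlib
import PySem

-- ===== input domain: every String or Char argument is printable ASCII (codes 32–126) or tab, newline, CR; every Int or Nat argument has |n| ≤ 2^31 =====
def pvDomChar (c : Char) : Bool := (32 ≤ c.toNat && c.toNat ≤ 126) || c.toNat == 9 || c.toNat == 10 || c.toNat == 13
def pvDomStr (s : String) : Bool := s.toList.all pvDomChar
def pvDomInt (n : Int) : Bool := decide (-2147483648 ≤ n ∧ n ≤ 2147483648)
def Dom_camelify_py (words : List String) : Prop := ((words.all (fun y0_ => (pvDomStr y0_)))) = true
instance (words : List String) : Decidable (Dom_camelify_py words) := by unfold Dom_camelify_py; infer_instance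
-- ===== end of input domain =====

-- B capitalizes every cleaned word uniformly, joins, then lowercases the first
-- character of the finished string, removing A's first-word flag (objective: faster).


-- ===== PORT A =====
-- removeAnnotations: the while loop over index i accumulating w, stopping at '\'
def removeAnnotationsGo : List Char → List Char → List Char
  | [], w => w
  | c :: rest, w => if c = '\\' then w else removeAnnotationsGo rest (w ++ [c])

def removeAnnotations (word : String) : String :=
  String.ofList (removeAnnotationsGo word.toList [])

-- capitalizeFirst: w[0].upper() + w[1:] (A only calls it on non-empty w; [] unreached)
def capitalizeFirst (w : String) : String :=
  match w.toList with
  | [] => ""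
  | c :: rest => String.ofList (PySem.Chars.upperChar c :: rest)

def camelify_py (words : List String) : String :=
  words.foldl
    (fun newText word0 =>
      let word := removeAnnotations word0
      if word.toList.length < 1 then newText
      else if newText = "" then
        -- word[:1].lower() + word[1:]
        match word.toList with
        | [] => newText
        | c :: rest => String.ofList (PySem.Chars.lowerChar c :: rest)
      else newText ++ capitalizeFirst word)
    ""

-- ===== PORT B =====
-- w.split('\\', 1)[0] : the prefix before the first backslash
def cleanWord (w : String) : String :=
  String.ofList (w.toList.takeWhile (fun c => c ≠ '\\'))

-- c[:1].upper() + c[1:]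
def upperFirst (w : String) : String :=
  match w.toList with
  | [] => ""
  | c :: cs => String.ofList (PySem.Chars.upperChar c :: cs)

-- s[:1].lower() + s[1:]
def lowerFirst (w : String) : String :=
  match w.toList with
  | [] => ""
  | c :: cs => String.ofList (PySem.Chars.lowerChar c :: cs)

def camelify_py_alt (words : List String) : String :=
  let s := PySem.Str.join ""
    (((words.map cleanWord).filter (fun w => w ≠ "")).map upperFirst)
  lowerFirst s

-- ===== PRECONDITION & SPEC =====
def Spec_camelify_py (words : List String) (out : String) : Prop := out = camelify_py_alt words
instance (words : List String) (out : String) : Decidable (Spec_camelify_py words out) := by unfold Spec_camelify_py; infer_instance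

-- ===== CLAIM =====
def Claim_equal_camelify_py : Prop := ∀ (words : List String), Dom_camelify_py words → Spec_camelify_py words (camelify_py words)

-- ===== LEMMAS AND PROOFS =====

theorem lower_upper_char (c : Char) :
    PySem.Chars.lowerChar (PySem.Chars.upperChar c) = PySem.Chars.lowerChar c := by
  unfold PySem.Chars.upperChar PySem.Chars.lowerChar PySem.Chars.islower PySem.Chars.isupper
  simp only [Bool.and_eq_true, decide_eq_true_eq]
  by_cases hl : 'a' ≤ c ∧ c ≤ 'z'
  · obtain ⟨h1, h2⟩ := hl
    have h1' : (97 : Nat) ≤ c.toNat := h1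
    have h2' : c.toNat ≤ 122 := h2
    have hv : Nat.isValidChar (c.toNat - 32) := Or.inl (by omega)
    have ht : (Char.ofNat (c.toNat - 32)).toNat = c.toNat - 32 := by
      rw [Char.toNat_ofNat, if_pos hv]
    have hab : 'a' ≤ c ∧ c ≤ 'z' := ⟨h1, h2⟩
    rw [if_pos hab]
    rw [if_pos (show 'A' ≤ Char.ofNat (c.toNat - 32) ∧ Char.ofNat (c.toNat - 32) ≤ 'Z' from
      ⟨show (65:Nat) ≤ (Char.ofNat (c.toNat - 32)).toNat by rw [ht]; omega,
       show (Char.ofNat (c.toNat - 32)).toNat ≤ (90:Nat) by rw [ht]; omega⟩)]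
    rw [if_neg (show ¬('A' ≤ c ∧ c ≤ 'Z') by
      rintro ⟨ha, hb⟩; exact absurd (show c.toNat ≤ 90 from hb) (by omega))]
    rw [ht]
    have h32 : c.toNat - 32 + 32 = c.toNat := by omega
    rw [h32, Char.ofNat_toNat]
  · rw [if_neg hl]

theorem removeAnnotationsGo_eq (l acc : List Char) :
    removeAnnotationsGo l acc = acc ++ l.takeWhile (fun c => c ≠ '\\') := by
  induction l generalizing acc with
  | nil => simp [removeAnnotationsGo]
  | cons c rest ih =>
    simp only [removeAnnotationsGo, List.takeWhile]
    by_cases h : c = '\\' <;> simp [h, ih]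

theorem removeAnnotations_eq_cleanWord (w : String) :
    removeAnnotations w = cleanWord w := by
  simp [removeAnnotations, cleanWord, removeAnnotationsGo_eq]

theorem append_ne_empty_left (a b : String) (h : a ≠ "") : a ++ b ≠ "" := by
  intro he
  have : (a ++ b).toList = [] := String.toList_eq_nil_iff.mpr he
  simp at this
  exact h this.1

-- how B's join continues past the first kept word
def tailPart (ws : List String) : String :=
  PySem.Str.join "" (((ws.map cleanWord).filter (fun w => w ≠ "")).map upperFirst)

theorem join_empty_cons (s : String) (rest : List String) :
    PySem.Str.join "" (s :: rest) = s ++ PySem.Str.join "" rest := by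
  cases rest with
  | nil => apply String.toList_injective; simp [PySem.Str.join, PySem.Chars.join, List.intercalate]
  | cons r rs =>
    apply String.toList_injective
    simp [PySem.Str.join, PySem.Chars.join, List.intercalate]

theorem lowerFirst_append_upper (c : Char) (cs : List Char) (t : String) :
    lowerFirst (String.ofList (PySem.Chars.upperChar c :: cs) ++ t)
      = String.ofList (PySem.Chars.lowerChar c :: cs) ++ t := by
  simp only [lowerFirst]
  have hl : (String.ofList (PySem.Chars.upperChar c :: cs) ++ t).toList
      = PySem.Chars.upperChar c :: (cs ++ t.toList) := by simp
  rw [hl]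
  show String.ofList (PySem.Chars.lowerChar (PySem.Chars.upperChar c) :: (cs ++ t.toList))
      = String.ofList (PySem.Chars.lowerChar c :: cs) ++ t
  rw [lower_upper_char]
  apply String.toList_injective
  simp

-- B's value = lowerFirst of the full capitalized join
theorem alt_eq_lowerFirst_tailPart (ws : List String) :
    camelify_py_alt ws = lowerFirst (tailPart ws) := rfl

-- A's fold, from an arbitrary accumulator
set_option maxHeartbeats 1600000 in
theorem camelify_fold (ws : List String) (acc : String) :
    ws.foldl
      (fun newText word0 =>
        let word := removeAnnotations word0
        if word.toList.length < 1 then newText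
        else if newText = "" then
          match word.toList with
          | [] => newText
          | c :: rest => String.ofList (PySem.Chars.lowerChar c :: rest)
        else newText ++ capitalizeFirst word) acc
    = if acc = "" then lowerFirst (tailPart ws) else acc ++ tailPart ws := by
  induction ws generalizing acc with
  | nil =>
    by_cases hacc : acc = "" <;>
      simp [tailPart, lowerFirst, PySem.Str.join, PySem.Chars.join, List.intercalate, hacc]
  | cons w ws ih =>
    simp only [List.foldl_cons]
    rw [removeAnnotations_eq_cleanWord]
    rcases hc : (cleanWord w).toList with _ | ⟨c, cs⟩
    · -- cleaned word empty: skipped by A, filtered out by B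
      have hce : cleanWord w = "" := String.toList_eq_nil_iff.mp hc
      simp only [List.length_nil]
      rw [if_pos (by norm_num), ih]
      simp [tailPart, hce]
    · have hlen : ¬ ((c :: cs).length < 1) := by simp
      have hcne : cleanWord w ≠ "" := by
        intro h; rw [h] at hc; simp at hc
      have htp : tailPart (w :: ws)
          = String.ofList (PySem.Chars.upperChar c :: cs) ++ tailPart ws := by
        simp only [tailPart, List.map_cons, List.filter_cons]
        rw [if_pos (by simpa using hcne)]
        simp only [List.map_cons]
        rw [join_empty_cons]
        congr 1
        simp [upperFirst, hc]
      by_cases hacc : acc = ""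
      · -- first kept word: A starts newText with the lowercased head;
        -- B lowercases the first char of the capitalized join (lower_upper_char)
        have hne : String.ofList (PySem.Chars.lowerChar c :: cs) ≠ "" := by
          intro he
          have := String.toList_eq_nil_iff.mpr he
          simp at this
        subst hacc
        rw [if_pos rfl, htp, lowerFirst_append_upper]
        rw [if_neg hlen, if_pos rfl]
        have hm : (match c :: cs with
            | [] => ("" : String)
            | c :: rest => String.ofList (PySem.Chars.lowerChar c :: rest))
            = String.ofList (PySem.Chars.lowerChar c :: cs) := rfl
        rw [hm, ih, if_neg hne]
      · -- later word: A appends capitalizeFirst, B's join contributes upperFirst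
        simp only [if_neg hlen, if_neg hacc, ih,
          if_neg (append_ne_empty_left acc _ hacc)]
        rw [htp, ← String.append_assoc]
        congr 1
        simp [capitalizeFirst, hc]

-- ===== VERDICT =====
theorem camelify_py_spec : Claim_equal_camelify_py := by
  intro words _
  unfold Spec_camelify_py camelify_py
  rw [camelify_fold, if_pos rfl, alt_eq_lowerFirst_tailPart]
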